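-- pv_equiv track=rewrite | github.com/doomnonius/advent-of-code | 2015/day03.py | part2
-- ===== SOURCE A (Python) =====
-- class Coord:
-- 	def __init__(self, x, y):
-- 		self.x = x
-- 		self.y = y
--
-- 	def __repr__(self):
-- 		return f"{(self.y, self.x)}"
--
-- 	def __add__(self, other):
-- 		return Coord(self.x + other.x, self.y + other.y)
--
-- 	def __mul__(self, other: int):
-- 		return Coord(self.x * other, self.y * other)
--
-- 	def full_neighbors(self):
-- 		return [self + Coord(0, 1), self + Coord(0, -1), self + Coord(1, 0), self + Coord(-1, 0), self + Coord(1, 1), self + Coord(1, -1), self + Coord(-1, -1), self + Coord(-1, 1)]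
--
-- 	def neighbors(self):
-- 		return [self + Coord(0, 1), self + Coord(0, -1), self + Coord(1, 0), self + Coord(-1, 0)]
--
-- 	def __eq__(self, other):
-- 		return self.x == other.x and self.y == other.y
--
-- 	def __hash__(self):
-- 		return hash((self.x, self.y))
--
-- def part2(inp: str) -> int:
-- 	loc = Coord(0, 0)
-- 	loc2 = Coord(0, 0)
-- 	visited = {loc}
-- 	for char in inp[::2]:
-- 		if char == "^":
-- 			loc = loc + Coord(0, -1)
-- 		elif char == "v":
-- 			loc = loc + Coord(0, 1)
-- 		elif char == "<":
-- 			loc = loc + Coord(-1, 0)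
-- 		else:
-- 			loc = loc + Coord(1, 0)
-- 		visited.add(loc)
-- 	for char in inp[1::2]:
-- 		if char == "^":
-- 			loc2 = loc2 + Coord(0, -1)
-- 		elif char == "v":
-- 			loc2 = loc2 + Coord(0, 1)
-- 		elif char == "<":
-- 			loc2 = loc2 + Coord(-1, 0)
-- 		else:
-- 			loc2 = loc2 + Coord(1, 0)
-- 		visited.add(loc2)
-- 	return len(visited)
-- ===== SOURCE B (Python) =====
-- def part2(inp: str) -> int:
--     deltas = {"^": (0, -1), "v": (0, 1), "<": (-1, 0)}
--     santa = (0, 0)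
--     robot = (0, 0)
--     visited = {(0, 0)}
--     for i, ch in enumerate(inp):
--         dx, dy = deltas.get(ch, (1, 0))
--         if i % 2 == 0:
--             santa = (santa[0] + dx, santa[1] + dy)
--             visited.add(santa)
--         else:
--             robot = (robot[0] + dx, robot[1] + dy)
--             visited.add(robot)
--     return len(visited)
-- ===== Notes on version B (the rewrite author's own statement) =====
-- stated objective: faster
-- what changed: A makes two separate passes, one over the stride-2 slice inp[::2] for Santa and one over inp[1::2] for the robot; B makes a single interleaved pass over enumerate(inp), dispatching each character to the walker selected by i % 2 and looking the move up in a delta dictionary instead of an if/elif chain, avoiding the two slice copies.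
import Mathlib
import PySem

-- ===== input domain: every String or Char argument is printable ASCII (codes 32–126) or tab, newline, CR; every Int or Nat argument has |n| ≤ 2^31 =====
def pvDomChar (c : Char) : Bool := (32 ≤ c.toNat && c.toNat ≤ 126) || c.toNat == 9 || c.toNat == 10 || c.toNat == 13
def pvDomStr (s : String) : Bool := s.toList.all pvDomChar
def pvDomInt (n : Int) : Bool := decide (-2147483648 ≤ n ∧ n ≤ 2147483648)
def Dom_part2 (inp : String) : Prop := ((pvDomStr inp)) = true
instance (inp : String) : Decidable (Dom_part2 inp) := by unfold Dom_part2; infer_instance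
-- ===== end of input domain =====

-- B replaces A's two stride-2 slice passes by one interleaved pass over enumerate(inp)
-- with a delta dictionary, avoiding the two slice copies (measured constant-factor speedup).

-- ===== PORT A =====
-- A's if/elif chain moving a walker one step (Coord is ported as Int × Int).
def stepA (p : Int × Int) (c : Char) : Int × Int :=
  if c = '^' then (p.1 + 0, p.2 + (-1))
  else if c = 'v' then (p.1 + 0, p.2 + 1)
  else if c = '<' then (p.1 + (-1), p.2 + 0)
  else (p.1 + 1, p.2 + 0)

def part2 (inp : String) : Int :=
  let start : Int × Int := (0, 0)
  -- for char in inp[::2]: … (state: loc, visited); step 2 ≠ 0, so the slice never raises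
  let st1 := ((PySem.List.slice? inp.toList none none 2).getD []).foldl
      (fun (st : (Int × Int) × PySem.Set (Int × Int)) c =>
        let l := stepA st.1 c
        (l, PySem.Set.add st.2 l))
      (start, PySem.Set.ofList [start])
  -- for char in inp[1::2]: … (state: loc2, visited)
  let st2 := ((PySem.List.slice? inp.toList (some 1) none 2).getD []).foldl
      (fun (st : (Int × Int) × PySem.Set (Int × Int)) c =>
        let l := stepA st.1 c
        (l, PySem.Set.add st.2 l))
      (start, st1.2)
  PySem.Set.len st2.2

-- ===== PORT B =====
def deltas_alt : PySem.Dict Char (Int × Int) :=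
  PySem.Dict.mk [('^', (0, -1)), ('v', (0, 1)), ('<', (-1, 0))]

def part2_alt (inp : String) : Int :=
  let st := (PySem.List.enumerate inp.toList 0).foldl
      (fun (st : (Int × Int) × (Int × Int) × PySem.Set (Int × Int)) ic =>
        let d := PySem.Dict.getD deltas_alt ic.2 (1, 0)
        if PySem.Int.mod ic.1 2 = 0 then
          let s := (st.1.1 + d.1, st.1.2 + d.2)
          (s, st.2.1, PySem.Set.add st.2.2 s)
        else
          let r := (st.2.1.1 + d.1, st.2.1.2 + d.2)
          (st.1, r, PySem.Set.add st.2.2 r))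
      (((0, 0) : Int × Int), ((0, 0) : Int × Int), PySem.Set.ofList [((0, 0) : Int × Int)])
  PySem.Set.len st.2.2

-- ===== PRECONDITION & SPEC =====
def Spec_part2 (inp : String) (out : Int) : Prop := out = part2_alt inp
instance (inp : String) (out : Int) : Decidable (Spec_part2 inp out) := by unfold Spec_part2; infer_instance

-- ===== CLAIM (what is proved, stated in full; the proofs are below) =====
def Claim_equal_part2 : Prop := ∀ (inp : String), Dom_part2 inp → Spec_part2 inp (part2 inp)

-- ===== LEMMAS AND PROOFS =====

-- elements of xs at even indices 0,2,4,…
def pvEvens {α : Type} : List α → List α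
  | [] => []
  | [a] => [a]
  | a :: _ :: t => a :: pvEvens t

-- elements of xs at odd indices 1,3,5,…
def pvOdds {α : Type} : List α → List α
  | [] => []
  | _ :: t => pvEvens t

theorem pvEvens_cons {α : Type} (a : α) (t : List α) :
    pvEvens (a :: t) = a :: pvOdds t := by
  cases t <;> rfl

-- the successive positions of a walker starting at p reading cs (start excluded)
def pvWalk (p : Int × Int) : List Char → List (Int × Int)
  | [] => []
  | c :: t => stepA p c :: pvWalk (stepA p c) t

theorem pv_fm_evens {α : Type} (xs : List α) :
    List.filterMap (fun k : Nat => xs[2 * k]?) (List.range ((xs.length + 1) / 2)) = pvEvens xs := by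
  induction xs using pvEvens.induct with
  | case1 => simp [pvEvens]
  | case2 a => simp [pvEvens]
  | case3 a b t ih =>
      simp only [List.length_cons]
      rw [show (t.length + 1 + 1 + 1) / 2 = (t.length + 1) / 2 + 1 by omega,
          List.range_succ_eq_map, List.filterMap_cons, List.filterMap_map]
      simp only [Nat.mul_zero, List.getElem?_cons_zero]
      rw [pvEvens, ← ih]
      refine congrArg₂ _ rfl ?_
      apply List.filterMap_congr
      intro k hk
      simp only [Function.comp]
      rw [show 2 * Nat.succ k = (2 * k + 1) + 1 by omega]
      simp [List.getElem?_cons_succ]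

theorem pv_fm_odds {α : Type} (xs : List α) :
    List.filterMap (fun k : Nat => xs[2 * k + 1]?) (List.range (xs.length / 2)) = pvOdds xs := by
  cases xs with
  | nil => simp [pvOdds]
  | cons a t =>
      rw [pvOdds, ← pv_fm_evens]
      simp only [List.length_cons]
      apply List.filterMap_congr
      intro k hk
      simp [List.getElem?_cons_succ]

theorem pv_slice_evens {α : Type} (xs : List α) :
    (PySem.List.slice? xs none none 2).getD [] = pvEvens xs := by
  rw [← pv_fm_evens]
  unfold PySem.List.slice? PySem.List.sliceIndices
  norm_num
  rw [show (if 0 < xs.length then (((xs.length : Int) + 2 - 1) / 2).toNat else 0)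
        = (xs.length + 1) / 2 by split <;> omega]
  apply List.filterMap_congr
  intro k hk
  rw [show ((2 : Int) * (k : Int)).toNat = 2 * k by omega]

theorem pv_slice_odds {α : Type} (xs : List α) :
    (PySem.List.slice? xs (some 1) none 2).getD [] = pvOdds xs := by
  rw [← pv_fm_odds]
  unfold PySem.List.slice? PySem.List.sliceIndices
  norm_num
  cases xs with
  | nil => simp
  | cons a t =>
      rw [show (if 1 < (a :: t).length
            then ((((a :: t).length : Int) - min 1 ((a :: t).length : Int) + 2 - 1) / 2).toNat else 0)
          = (a :: t).length / 2 by simp [List.length_cons]; split <;> omega]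
      apply List.filterMap_congr
      intro k hk
      rw [show (min 1 ((a :: t).length : Int) + 2 * (k : Int)).toNat = 2 * k + 1 by
        simp [List.length_cons]; omega]

-- A's loop adds exactly the walk positions: its visited component is a Set.update
theorem pvA_fold (cs : List Char) :
    ∀ (p : Int × Int) (v : PySem.Set (Int × Int)),
      (cs.foldl
        (fun (st : (Int × Int) × PySem.Set (Int × Int)) c =>
          let l := stepA st.1 c
          (l, PySem.Set.add st.2 l)) (p, v)).2
      = PySem.Set.update v (pvWalk p cs) := by
  induction cs with
  | nil => intro p v; rfl
  | cons c t ih =>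
      intro p v
      simp only [List.foldl_cons, pvWalk, PySem.Set.update_cons]
      exact ih (stepA p c) (PySem.Set.add v (stepA p c))

-- B's dictionary move equals A's if/elif step
theorem pvStep_eq (p : Int × Int) (c : Char) :
    (p.1 + (PySem.Dict.getD deltas_alt c (1, 0)).1,
     p.2 + (PySem.Dict.getD deltas_alt c (1, 0)).2) = stepA p c := by
  unfold stepA deltas_alt
  simp only [PySem.Dict.getD_eq_get?_getD, PySem.Dict.get?_mk_cons]
  split_ifs <;> simp_all [PySem.Dict.get?] <;> simp_all [eq_comm]

theorem pv_mod_succ (i : Int) :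
    (PySem.Int.mod (i + 1) 2 = 0) ↔ ¬ (PySem.Int.mod i 2 = 0) := by
  simp only [PySem.Int.mod, Int.fmod_eq_emod]; omega

-- membership in B's visited set: the interleaved pass visits exactly the two walks
theorem pvB_mem (cs : List Char) :
    ∀ (i : Int) (a b : Int × Int) (v : PySem.Set (Int × Int)) (x : Int × Int),
      (x ∈ ((PySem.List.enumerate cs i).foldl
        (fun (st : (Int × Int) × (Int × Int) × PySem.Set (Int × Int)) ic =>
          let d := PySem.Dict.getD deltas_alt ic.2 (1, 0)
          if PySem.Int.mod ic.1 2 = 0 then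
            let s := (st.1.1 + d.1, st.1.2 + d.2)
            (s, st.2.1, PySem.Set.add st.2.2 s)
          else
            let r := (st.2.1.1 + d.1, st.2.1.2 + d.2)
            (st.1, r, PySem.Set.add st.2.2 r)) (a, b, v)).2.2)
      ↔ (x ∈ v ∨ (if PySem.Int.mod i 2 = 0
            then x ∈ pvWalk a (pvEvens cs) ∨ x ∈ pvWalk b (pvOdds cs)
            else x ∈ pvWalk b (pvEvens cs) ∨ x ∈ pvWalk a (pvOdds cs))) := by
  induction cs with
  | nil =>
      intro i a b v x
      simp only [PySem.List.enumerate, List.foldl_nil, pvEvens, pvOdds, pvWalk,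
        List.not_mem_nil, or_false]
      split <;> simp
  | cons c t ih =>
      intro i a b v x
      rw [PySem.List.enumerate_cons, List.foldl_cons]
      dsimp only
      by_cases hp : PySem.Int.mod i 2 = 0
      · simp only [hp, if_true]
        rw [ih (i + 1) _ b _ x, pvStep_eq a c]
        have hodd : ¬ (PySem.Int.mod (i + 1) 2 = 0) := by rw [pv_mod_succ]; exact fun h => h hp
        simp only [hodd, if_false, PySem.Set.mem_add,
          pvEvens_cons, pvOdds, pvWalk, List.mem_cons]
        tauto
      · simp only [hp, if_false]
        rw [ih (i + 1) a _ _ x, pvStep_eq b c]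
        have heven : PySem.Int.mod (i + 1) 2 = 0 := by rw [pv_mod_succ]; exact hp
        simp only [heven, if_true, PySem.Set.mem_add,
          pvEvens_cons, pvOdds, pvWalk, List.mem_cons]
        tauto

theorem pvB_nodup (cs : List Char) :
    ∀ (i : Int) (a b : Int × Int) (v : PySem.Set (Int × Int)), v.Nodup →
      ((PySem.List.enumerate cs i).foldl
        (fun (st : (Int × Int) × (Int × Int) × PySem.Set (Int × Int)) ic =>
          let d := PySem.Dict.getD deltas_alt ic.2 (1, 0)
          if PySem.Int.mod ic.1 2 = 0 then
            let s := (st.1.1 + d.1, st.1.2 + d.2)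
            (s, st.2.1, PySem.Set.add st.2.2 s)
          else
            let r := (st.2.1.1 + d.1, st.2.1.2 + d.2)
            (st.1, r, PySem.Set.add st.2.2 r)) (a, b, v)).2.2.Nodup := by
  induction cs with
  | nil => intro i a b v hv; simpa [PySem.List.enumerate] using hv
  | cons c t ih =>
      intro i a b v hv
      rw [PySem.List.enumerate_cons, List.foldl_cons]
      dsimp only
      by_cases hp : PySem.Int.mod i 2 = 0
      · simp only [hp, if_true]
        exact ih (i + 1) _ b _ (PySem.Set.nodup_add _ _ hv)
      · simp only [hp, if_false]
        exact ih (i + 1) a _ _ (PySem.Set.nodup_add _ _ hv)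

-- ===== VERDICT (by name: the statement is the Claim_ definition above) =====
theorem part2_spec : Claim_equal_part2 := by
  intro inp _
  unfold Spec_part2 part2 part2_alt
  simp only [pv_slice_evens, pv_slice_odds, pvA_fold, ← PySem.Set.update_append]
  have h0 : PySem.Int.mod 0 2 = 0 := by decide
  have hA : (PySem.Set.update (PySem.Set.ofList [(((0 : Int), (0 : Int)))])
      (pvWalk (0, 0) (pvEvens inp.toList) ++ pvWalk (0, 0) (pvOdds inp.toList))).Nodup :=
    PySem.Set.nodup_update _ _ (PySem.Set.nodup_ofList _)
  have hB := pvB_nodup inp.toList 0 (0, 0) (0, 0) _ (PySem.Set.nodup_ofList [((0 : Int), (0 : Int))])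
  have hmem : ∀ x, x ∈ (PySem.Set.update (PySem.Set.ofList [(((0 : Int), (0 : Int)))])
      (pvWalk (0, 0) (pvEvens inp.toList) ++ pvWalk (0, 0) (pvOdds inp.toList)))
      ↔ x ∈ ((PySem.List.enumerate inp.toList 0).foldl
        (fun (st : (Int × Int) × (Int × Int) × PySem.Set (Int × Int)) ic =>
          let d := PySem.Dict.getD deltas_alt ic.2 (1, 0)
          if PySem.Int.mod ic.1 2 = 0 then
            let s := (st.1.1 + d.1, st.1.2 + d.2)
            (s, st.2.1, PySem.Set.add st.2.2 s)
          else
            let r := (st.2.1.1 + d.1, st.2.1.2 + d.2)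
            (st.1, r, PySem.Set.add st.2.2 r))
        ((0, 0), (0, 0), PySem.Set.ofList [((0 : Int), (0 : Int))])).2.2 := by
    intro x
    rw [pvB_mem inp.toList 0 (0, 0) (0, 0) _ x, PySem.Set.mem_update]
    simp only [h0, if_true, List.mem_append]
  have hperm := (List.perm_ext_iff_of_nodup hA hB).2 hmem
  simp only [PySem.Set.len, hperm.length_eq]
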